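-- pv_equiv track=rewrite | github.com/nidhiatwork/Python_Coding_Practice | Lists/placeCows.py | placeCows
-- ===== SOURCE A (Python) =====
-- def placeCows(arr, C):
--     low = 0
--     ans = 0
--     high = len(arr)
--     while low<=high:
--         mid = (low + high)//2
--         if canPutCowsWithDist(mid, C, arr):
--             low = mid+1
--             ans = mid
--         else:
--             high = mid-1
--     return ans
--
-- def canPutCowsWithDist(x, C, arr):
--     idx=0
--     while idx<len(arr):
--         C-=1
--         if C==0:
--             return True
--         idx+=x
--     return False
-- ===== SOURCE B (Python) =====
-- def placeCows(arr, C):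
--     # Closed form: largest step x with ceil(len/x) >= C, i.e. (C-1)*x < len.
--     n = len(arr)
--     if n == 0:
--         return 0
--     if C == 1:
--         return n
--     return (n - 1) // (C - 1)
-- ===== Notes on version B (the rewrite author's own statement) =====
-- stated objective: faster
-- what changed: Replaced the binary search with its inner linear cow-placement scan by the closed form (len-1)//(C-1) derived from the feasibility test (C-1)*x < len.
import Mathlib
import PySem

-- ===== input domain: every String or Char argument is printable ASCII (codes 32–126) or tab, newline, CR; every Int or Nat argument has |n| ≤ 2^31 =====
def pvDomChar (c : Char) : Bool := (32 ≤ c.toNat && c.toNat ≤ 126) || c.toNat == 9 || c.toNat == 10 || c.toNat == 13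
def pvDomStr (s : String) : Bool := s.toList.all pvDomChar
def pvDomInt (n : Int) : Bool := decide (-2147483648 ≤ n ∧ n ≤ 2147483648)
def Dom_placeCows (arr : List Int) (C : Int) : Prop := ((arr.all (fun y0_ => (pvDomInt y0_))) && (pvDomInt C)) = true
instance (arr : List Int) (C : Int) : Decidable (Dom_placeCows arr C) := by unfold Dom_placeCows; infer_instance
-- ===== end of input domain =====

-- B replaces A's binary search (with its linear feasibility scan) by a closed form; equivalence is
-- claimed on Pre_ (C >= 1 or arr empty), since A loops forever otherwise.

-- ===== PORT A =====
-- the 'while idx < len(arr)' loop of canPutCowsWithDist; fuel only makes the recursion total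
-- (it is never exhausted on inputs where the Python loop terminates, see Pre_ below)
def canPutGo (x n : Int) : Nat → Int → Int → Bool
  | 0, _, _ => false
  | fuel + 1, idx, C =>
    if idx < n then
      if C - 1 = 0 then true
      else canPutGo x n fuel (idx + x) (C - 1)
    else false

def canPutCowsWithDist (x C : Int) (arr : List Int) : Bool :=
  canPutGo x (arr.length : Int) (arr.length + C.toNat + 1) 0 C

-- the 'while low <= high' binary-search loop of placeCows; the interval shrinks each iteration,
-- so fuel len(arr)+2 is never exhausted (again only a totality guard)
def placeCowsGo (arr : List Int) (C : Int) : Nat → Int → Int → Int → Int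
  | 0, _, _, ans => ans
  | fuel + 1, low, high, ans =>
    if low ≤ high then
      let mid := PySem.Int.floordiv (low + high) 2
      if canPutCowsWithDist mid C arr then
        placeCowsGo arr C fuel (mid + 1) high mid
      else
        placeCowsGo arr C fuel low (mid - 1) ans
    else ans

def placeCows (arr : List Int) (C : Int) : Int :=
  placeCowsGo arr C (arr.length + 2) 0 (arr.length : Int) 0

-- ===== PORT B =====
def placeCows_alt (arr : List Int) (C : Int) : Int :=
  let n : Int := (arr.length : Int)
  if n = 0 then 0
  else if C = 1 then n
  else PySem.Int.floordiv (n - 1) (C - 1)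

-- ===== PRECONDITION & SPEC =====
-- A's canPutCowsWithDist loops forever when C <= 0 and arr is nonempty (the binary search reaches
-- mid = 0, where idx never advances and C never hits 0); exactly those inputs are excluded.
def Pre_placeCows (arr : List Int) (C : Int) : Prop := 1 ≤ C ∨ arr = []
instance (arr : List Int) (C : Int) : Decidable (Pre_placeCows arr C) := by unfold Pre_placeCows; infer_instance
def pvWitness_placeCows : List Int × Int := ([4, 1, 9], 2)

def Spec_placeCows (arr : List Int) (C : Int) (out : Int) : Prop := out = placeCows_alt arr C
instance (arr : List Int) (C : Int) (out : Int) : Decidable (Spec_placeCows arr C out) := by unfold Spec_placeCows; infer_instance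

-- ===== CLAIM (what is proved, stated in full; the proofs are below) =====
def Claim_equal_placeCows : Prop := ∀ (arr : List Int) (C : Int), Dom_placeCows arr C → Pre_placeCows arr C → Spec_placeCows arr C (placeCows arr C)

-- ===== LEMMAS AND PROOFS =====

-- Characterisation of A's feasibility scan: with step x >= 0 and C >= 1 cows, enough fuel,
-- the loop from index idx succeeds iff (C-1)*x < n - idx.
theorem canPutGo_eq (x n : Int) (hx : 0 ≤ x) :
    ∀ (fuel : Nat) (idx C : Int), 1 ≤ C → (n - idx).toNat + C.toNat ≤ fuel →
      canPutGo x n fuel idx C = decide ((C - 1) * x < n - idx) := by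
  intro fuel
  induction fuel with
  | zero => intro idx C hC hf; exfalso; omega
  | succ fuel ih =>
    intro idx C hC hf
    unfold canPutGo
    by_cases hidx : idx < n
    · simp only [if_pos hidx]
      by_cases hC1 : C - 1 = 0
      · have hCe : C = 1 := by omega
        subst hCe
        simp only [if_pos hC1]
        simp [hidx]
      · simp only [if_neg hC1]
        rw [ih (idx + x) (C - 1) (by omega) (by omega)]
        have key : (C - 1 - 1) * x < n - (idx + x) ↔ (C - 1) * x < n - idx := by
          constructor <;> intro h <;> nlinarith [h]
        simp only [decide_eq_decide]
        exact key
    · simp only [if_neg hidx]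
      have h1 : ¬ (C - 1) * x < n - idx := by
        have : 0 ≤ (C - 1) * x := mul_nonneg (by omega) hx
        omega
      simp [h1]

theorem canPut_eq (x C : Int) (arr : List Int) (hx : 0 ≤ x) (hC : 1 ≤ C) :
    canPutCowsWithDist x C arr = decide ((C - 1) * x < (arr.length : Int)) := by
  unfold canPutCowsWithDist
  rw [canPutGo_eq x (arr.length : Int) hx _ 0 C hC (by omega)]
  simp

theorem canPut_nil (x C : Int) : canPutCowsWithDist x C [] = false := by
  show canPutGo x ((0:Nat):Int) (0 + C.toNat + 1) 0 C = false
  rw [show 0 + C.toNat + 1 = C.toNat + 1 from by omega]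
  simp [canPutGo]

-- On the empty list every feasibility test fails, so the loop just hands back ans.
theorem placeCowsGo_nil (C : Int) :
    ∀ (fuel : Nat) (low high ans : Int), placeCowsGo [] C fuel low high ans = ans := by
  intro fuel
  induction fuel with
  | zero => intro low high ans; rfl
  | succ fuel ih =>
    intro low high ans
    simp only [placeCowsGo]
    by_cases h : low ≤ high
    · simp only [if_pos h, canPut_nil, Bool.false_eq_true, if_false, ih]
    · simp only [if_neg h]

-- Binary-search loop invariant: with target T (the largest feasible step), the loop returns T.
theorem placeCowsGo_eq (arr : List Int) (C : Int) (hC : 1 ≤ C) (T : Int) (hT0 : 0 ≤ T)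
    (hTchar : ∀ x, 0 ≤ x → x ≤ (arr.length : Int) →
        (((C - 1) * x < (arr.length : Int)) ↔ x ≤ T)) :
    ∀ (fuel : Nat) (low high ans : Int), 0 ≤ low → low - 1 ≤ T → T ≤ high →
      high ≤ (arr.length : Int) → ans = max (low - 1) 0 → (high + 1 - low).toNat < fuel →
      placeCowsGo arr C fuel low high ans = T := by
  intro fuel
  induction fuel with
  | zero => intro low high ans h0 hlT hTh hhn hans hf; exfalso; omega
  | succ fuel ih =>
    intro low high ans h0 hlT hTh hhn hans hf
    simp only [placeCowsGo]
    by_cases h : low ≤ high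
    · rw [if_pos h]
      have hmid := PySem.Int.floordiv_two_mid_bounds h
      by_cases hcan : canPutCowsWithDist (PySem.Int.floordiv (low + high) 2) C arr = true
      · rw [if_pos hcan]
        have hfeas : (C - 1) * PySem.Int.floordiv (low + high) 2 < (arr.length : Int) := by
          rw [canPut_eq _ C arr (by omega) hC] at hcan
          exact of_decide_eq_true hcan
        have hmT := (hTchar _ (by omega) (by omega)).mp hfeas
        exact ih _ high _ (by omega) (by omega) hTh hhn (by omega) (by omega)
      · rw [if_neg hcan]
        have hmT : ¬ PySem.Int.floordiv (low + high) 2 ≤ T := by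
          intro hle
          apply hcan
          rw [canPut_eq _ C arr (by omega) hC]
          exact decide_eq_true ((hTchar _ (by omega) (by omega)).mpr hle)
        exact ih low _ ans h0 hlT (by omega) (by omega) hans (by omega)
    · rw [if_neg h]
      omega

theorem placeCows_spec : Claim_equal_placeCows := by
  unfold Claim_equal_placeCows
  intro arr C _ hpre
  unfold Spec_placeCows placeCows placeCows_alt
  by_cases hnil : arr = []
  · subst hnil
    rw [placeCowsGo_nil]
    norm_num
  · have hn : 1 ≤ (arr.length : Int) := by
      have := List.length_pos_iff.mpr hnil
      omega
    have hC : 1 ≤ C := by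
      rcases hpre with h | h
      · exact h
      · exact absurd h hnil
    show placeCowsGo arr C (arr.length + 2) 0 ((arr.length : Int)) 0 =
      if ((arr.length : Int)) = 0 then 0 else if C = 1 then ((arr.length : Int))
      else PySem.Int.floordiv (((arr.length : Int)) - 1) (C - 1)
    set n : Int := (arr.length : Int) with hndef
    set T : Int := if C = 1 then n else PySem.Int.floordiv (n - 1) (C - 1) with hT
    have hchar : ∀ x, 0 ≤ x → x ≤ n → (((C - 1) * x < n) ↔ x ≤ T) := by
      intro x hx0 hxn
      by_cases hC1 : C = 1
      · subst hC1
        rw [hT, if_pos rfl]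
        simp only [show ((1:Int) - 1) = 0 from rfl, zero_mul]
        omega
      · have hC2 : (0 : Int) < C - 1 := by omega
        rw [hT, if_neg hC1]
        constructor
        · intro h
          exact (PySem.Int.le_floordiv_iff_mul_le hC2).mpr (by nlinarith)
        · intro h
          have := (PySem.Int.le_floordiv_iff_mul_le hC2).mp h
          nlinarith
    have hT0 : 0 ≤ T := by
      rw [hT]
      by_cases hC1 : C = 1
      · rw [if_pos hC1]; omega
      · rw [if_neg hC1]
        exact (PySem.Int.le_floordiv_iff_mul_le (show (0:Int) < C - 1 by omega)).mpr
          (by rw [zero_mul]; omega)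
    have hTn : T ≤ n := by
      rw [hT]
      by_cases hC1 : C = 1
      · rw [if_pos hC1]
      · rw [if_neg hC1]
        have hC2 : (0 : Int) < C - 1 := by omega
        have := (PySem.Int.floordiv_lt_iff_lt_mul (a := n - 1) (b := C - 1) (q := n) hC2).mpr
          (by nlinarith)
        omega
    rw [if_neg (show ¬ n = 0 by omega)]
    exact placeCowsGo_eq arr C hC T hT0 hchar (arr.length + 2) 0 n 0 (by omega) (by omega)
      hTn le_rfl (by omega) (by omega)
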